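-- pv_equiv track=rewrite | github.com/yoshivda/aoc2021 | days/day22.py | calculate
-- ===== SOURCE A (Python) =====
-- def calculate(cubes, limit):
--     processed = []
--     for cur in cubes:
--         on, xmin, xmax, ymin, ymax, zmin, zmax = cur
--         if limit and (min(xmin, ymin, zmin) < -50 or max(xmax, ymax, zmax) > 50):
--             continue
--         processed.extend([(not pc[0], *ol) for pc in processed if (ol := overlap(cur, pc))])
--         if on:
--             processed.append(cur)
--     return sum(volume(*c[1:]) * (1 if c[0] else -1) for c in processed)
--
-- def volume(xmin, xmax, ymin, ymax, zmin, zmax):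
--     return abs(xmax-xmin + 1) * abs(ymax-ymin + 1) * abs(zmax-zmin + 1)
--
-- def overlap(c1, c2):
--     _, xmin1, xmax1, ymin1, ymax1, zmin1, zmax1 = c1
--     _, xmin2, xmax2, ymin2, ymax2, zmin2, zmax2 = c2
--     if xmax1 < xmin2 or xmax2 < xmin1 or ymax1 < ymin2 or ymax2 < ymin1 or zmax1 < zmin2 or zmax2 < zmin1:
--         return 0
--     return max(xmin1, xmin2), min(xmax1, xmax2), max(ymin1, ymin2), min(ymax1, ymax2), max(zmin1, zmin2), min(zmax1, zmax2)
-- ===== SOURCE B (Python) =====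
-- def calculate(cubes, limit):
--     # For each kept 'on' cube, count the cells no LATER kept cube overwrites,
--     # by a per-cube recursive inclusion-exclusion over the later cubes; no
--     # global list of signed cuboids is ever accumulated.
--     kept = [(on, (xmin, xmax, ymin, ymax, zmin, zmax))
--             for on, xmin, xmax, ymin, ymax, zmin, zmax in cubes
--             if not (limit and (min(xmin, ymin, zmin) < -50
--                                or max(xmax, ymax, zmax) > 50))]
--     return _total(kept)
--
--
-- def _total(kept):
--     if not kept:
--         return 0
--     (on, box), rest = kept[0], kept[1:]
--     t = _total(rest)
--     if on:
--         t += _exclusive(box, [b for _, b in rest])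
--     return t
--
--
-- def _exclusive(box, later):
--     # cells of box not covered by any box in later (inclusion-exclusion)
--     if not later:
--         xmin, xmax, ymin, ymax, zmin, zmax = box
--         return abs(xmax - xmin + 1) * abs(ymax - ymin + 1) * abs(zmax - zmin + 1)
--     b, rest = later[0], later[1:]
--     result = _exclusive(box, rest)
--     ib = _clip(box, b)
--     if ib is not None:
--         result -= _exclusive(ib, rest)
--     return result
--
--
-- def _clip(b1, b2):
--     xmin1, xmax1, ymin1, ymax1, zmin1, zmax1 = b1
--     xmin2, xmax2, ymin2, ymax2, zmin2, zmax2 = b2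
--     if xmax1 < xmin2 or xmax2 < xmin1 or ymax1 < ymin2 or ymax2 < ymin1 \
--             or zmax1 < zmin2 or zmax2 < zmin1:
--         return None
--     return (max(xmin1, xmin2), min(xmax1, xmax2), max(ymin1, ymin2),
--             min(ymax1, ymax2), max(zmin1, zmin2), min(zmax1, zmax2))
-- ===== Notes on version B (the rewrite author's own statement) =====
-- stated objective: alternative
-- what changed: A sweeps the cubes once while accumulating an ever-growing global list of signed intersection cuboids and sums volume*sign at the end; B never builds such a list: it filters the cubes, then for each kept 'on' cube recursively computes the count of its cells not covered by any LATER kept cube (per-cube inclusion-exclusion recursion) and sums these.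
import Mathlib
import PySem

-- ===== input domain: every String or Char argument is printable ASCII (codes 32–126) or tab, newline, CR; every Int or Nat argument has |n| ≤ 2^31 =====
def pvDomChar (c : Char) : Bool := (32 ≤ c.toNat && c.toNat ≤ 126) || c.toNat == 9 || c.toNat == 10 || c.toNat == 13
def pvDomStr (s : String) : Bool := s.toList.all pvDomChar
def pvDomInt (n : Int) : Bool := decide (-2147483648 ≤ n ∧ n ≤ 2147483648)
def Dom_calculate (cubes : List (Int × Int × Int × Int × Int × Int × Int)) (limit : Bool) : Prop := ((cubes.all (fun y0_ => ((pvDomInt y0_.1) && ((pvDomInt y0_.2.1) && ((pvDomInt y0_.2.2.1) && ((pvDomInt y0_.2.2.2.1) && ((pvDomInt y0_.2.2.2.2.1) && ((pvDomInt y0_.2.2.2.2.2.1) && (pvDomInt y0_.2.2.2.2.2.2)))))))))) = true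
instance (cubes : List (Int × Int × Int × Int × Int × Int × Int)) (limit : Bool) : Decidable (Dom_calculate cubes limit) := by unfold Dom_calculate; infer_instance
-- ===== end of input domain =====

-- B replaces A's accumulated list of signed intersection cuboids by a per-cube recursion:
-- for each kept 'on' cube it counts the cells no later kept cube covers (alternative
-- decomposition, same cost class); the equal signed total is proved below.

abbrev PvBox := Int × Int × Int × Int × Int × Int

-- ===== PORT A =====
-- A's processed entries are heterogeneous Python tuples (int-or-bool flag, 6 coords);
-- modelled uniformly as Int × PvBox with bool flags as 0/1 (truthiness preserved).
def pvNotI (x : Int) : Int := if x = 0 then 1 else 0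

def pvSgn (x : Int) : Int := if x = 0 then -1 else 1   -- (1 if c[0] else -1)

def pvVolA (b : PvBox) : Int :=
  let (xmin, xmax, ymin, ymax, zmin, zmax) := b
  |xmax - xmin + 1| * |ymax - ymin + 1| * |zmax - zmin + 1|

def pvOverlapA (c1 c2 : Int × PvBox) : Option PvBox :=
  let (_, xmin1, xmax1, ymin1, ymax1, zmin1, zmax1) := c1
  let (_, xmin2, xmax2, ymin2, ymax2, zmin2, zmax2) := c2
  if xmax1 < xmin2 ∨ xmax2 < xmin1 ∨ ymax1 < ymin2 ∨ ymax2 < ymin1 ∨ zmax1 < zmin2 ∨ zmax2 < zmin1 then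
    none  -- Python returns the falsy 0 here; a returned tuple is always truthy
  else
    some (max xmin1 xmin2, min xmax1 xmax2, max ymin1 ymin2, min ymax1 ymax2,
          max zmin1 zmin2, min zmax1 zmax2)

def pvStepA (limit : Bool) (proc : List (Int × PvBox)) (cur : Int × Int × Int × Int × Int × Int × Int) :
    List (Int × PvBox) :=
  let (on, xmin, xmax, ymin, ymax, zmin, zmax) := cur
  if limit ∧ (min xmin (min ymin zmin) < -50 ∨ max xmax (max ymax zmax) > 50) then proc
  else
    let cur' : Int × PvBox := (on, (xmin, xmax, ymin, ymax, zmin, zmax))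
    let proc2 := proc ++ proc.filterMap (fun pc =>
      (pvOverlapA cur' pc).map (fun ol => (pvNotI pc.1, ol)))
    if on ≠ 0 then proc2 ++ [cur'] else proc2

def calculate (cubes : List (Int × Int × Int × Int × Int × Int × Int)) (limit : Bool) : Int :=
  let processed := cubes.foldl (pvStepA limit) []
  (processed.map (fun c => pvVolA c.2 * pvSgn c.1)).sum

-- ===== PORT B =====
def pvClipB (b1 b2 : PvBox) : Option PvBox :=
  let (xmin1, xmax1, ymin1, ymax1, zmin1, zmax1) := b1
  let (xmin2, xmax2, ymin2, ymax2, zmin2, zmax2) := b2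
  if xmax1 < xmin2 ∨ xmax2 < xmin1 ∨ ymax1 < ymin2 ∨ ymax2 < ymin1 ∨ zmax1 < zmin2 ∨ zmax2 < zmin1 then
    none
  else
    some (max xmin1 xmin2, min xmax1 xmax2, max ymin1 ymin2, min ymax1 ymax2,
          max zmin1 zmin2, min zmax1 zmax2)

-- _exclusive: cells of box not covered by any box in later (inclusion-exclusion)
def pvExcl : PvBox → List PvBox → Int
  | (xmin, xmax, ymin, ymax, zmin, zmax), [] =>
      |xmax - xmin + 1| * |ymax - ymin + 1| * |zmax - zmin + 1|
  | box, b :: rest =>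
      let result := pvExcl box rest
      match pvClipB box b with
      | some ib => result - pvExcl ib rest
      | none => result

-- _total
def pvTotalB : List (Int × PvBox) → Int
  | [] => 0
  | (on, box) :: rest =>
      let t := pvTotalB rest
      if on ≠ 0 then t + pvExcl box (rest.map Prod.snd) else t

def pvKeep (limit : Bool) (cur : Int × Int × Int × Int × Int × Int × Int) : Bool :=
  let (_, xmin, xmax, ymin, ymax, zmin, zmax) := cur
  !(limit && (decide (min xmin (min ymin zmin) < -50) || decide (max xmax (max ymax zmax) > 50)))

def pvToPair (c : Int × Int × Int × Int × Int × Int × Int) : Int × PvBox :=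
  (c.1, (c.2.1, c.2.2.1, c.2.2.2.1, c.2.2.2.2.1, c.2.2.2.2.2.1, c.2.2.2.2.2.2))

def calculate_alt (cubes : List (Int × Int × Int × Int × Int × Int × Int)) (limit : Bool) : Int :=
  let kept := (cubes.filter (pvKeep limit)).map pvToPair
  pvTotalB kept

-- ===== PRECONDITION & SPEC =====
def Spec_calculate (cubes : List (Int × Int × Int × Int × Int × Int × Int)) (limit : Bool) (out : Int) : Prop := out = calculate_alt cubes limit
instance (cubes : List (Int × Int × Int × Int × Int × Int × Int)) (limit : Bool) (out : Int) : Decidable (Spec_calculate cubes limit out) := by unfold Spec_calculate; infer_instance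

-- ===== CLAIM (what is proved, stated in full; the proofs are below) =====
def Claim_equal_calculate : Prop := ∀ (cubes : List (Int × Int × Int × Int × Int × Int × Int)) (limit : Bool), Dom_calculate cubes limit → Spec_calculate cubes limit (calculate cubes limit)

-- ===== LEMMAS AND PROOFS =====

-- A's step with the limit filter already applied, on unpacked entries.
def pvStepCore (proc : List (Int × PvBox)) (c : Int × PvBox) : List (Int × PvBox) :=
  let proc2 := proc ++ proc.filterMap (fun pc => (pvClipB pc.2 c.2).map (fun ol => (pvNotI pc.1, ol)))
  if c.1 ≠ 0 then proc2 ++ [c] else proc2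

theorem pv_overlap_symm (f : Int) (b1 : PvBox) (pc : Int × PvBox) :
    pvOverlapA (f, b1) pc = pvClipB pc.2 b1 := by
  obtain ⟨x1, x2, x3, x4, x5, x6⟩ := b1
  obtain ⟨g, y1, y2, y3, y4, y5, y6⟩ := pc
  simp only [pvOverlapA, pvClipB]
  by_cases h : x2 < y1 ∨ y2 < x1 ∨ x4 < y3 ∨ y4 < x3 ∨ x6 < y5 ∨ y6 < x5
  · rw [if_pos h, if_pos (by tauto)]
  · rw [if_neg h, if_neg (by tauto)]
    simp [max_comm, min_comm]

theorem pv_stepA_eq (limit : Bool) (proc : List (Int × PvBox)) (c : Int × Int × Int × Int × Int × Int × Int) :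
    pvStepA limit proc c = if pvKeep limit c then pvStepCore proc (pvToPair c) else proc := by
  obtain ⟨on, x1, x2, x3, x4, x5, x6⟩ := c
  have hov : ∀ pc : Int × PvBox,
      pvOverlapA (on, (x1, x2, x3, x4, x5, x6)) pc = pvClipB pc.2 (x1, x2, x3, x4, x5, x6) :=
    fun pc => pv_overlap_symm on _ pc
  cases limit with
  | false =>
    simp [pvStepA, pvKeep, pvStepCore, pvToPair, hov]
  | true =>
    by_cases hc : (min x1 (min x3 x5) < -50 ∨ max x2 (max x4 x6) > 50)
    · have hk : pvKeep true (on, x1, x2, x3, x4, x5, x6) = false := by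
        simp [pvKeep]; omega
      simp only [pvStepA, hk, Bool.false_eq_true, if_false]
      rw [if_pos (by exact ⟨trivial, hc⟩)]
    · have hk : pvKeep true (on, x1, x2, x3, x4, x5, x6) = true := by
        simp [pvKeep]; omega
      simp only [pvStepA, hk, if_true]
      rw [if_neg (by intro h; exact hc h.2)]
      simp [pvStepCore, pvToPair, hov]

theorem pv_fold_eq (limit : Bool) (cubes : List (Int × Int × Int × Int × Int × Int × Int)) :
    ∀ proc, cubes.foldl (pvStepA limit) proc =
      ((cubes.filter (pvKeep limit)).map pvToPair).foldl pvStepCore proc := by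
  induction cubes with
  | nil => intro proc; rfl
  | cons c cubes ih =>
    intro proc
    by_cases hk : pvKeep limit c
    · simp [hk, ih, pv_stepA_eq]
    · simp [hk, ih, pv_stepA_eq]

-- the weighted sum of a signed-entry list against pvExcl over later boxes R
def pvW (proc : List (Int × PvBox)) (R : List PvBox) : Int :=
  (proc.map (fun e => pvSgn e.1 * pvExcl e.2 R)).sum

theorem pv_sgn_notI (x : Int) : pvSgn (pvNotI x) = -pvSgn x := by
  unfold pvSgn pvNotI; by_cases h : x = 0 <;> simp [h]

theorem pvW_append (p q : List (Int × PvBox)) (R : List PvBox) :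
    pvW (p ++ q) R = pvW p R + pvW q R := by
  unfold pvW; simp

theorem pvW_flips (b : PvBox) (R : List PvBox) (proc : List (Int × PvBox)) :
    pvW (proc.filterMap (fun pc => (pvClipB pc.2 b).map (fun ol => (pvNotI pc.1, ol)))) R =
      (proc.map (fun pc =>
        match pvClipB pc.2 b with
        | some ib => -(pvSgn pc.1 * pvExcl ib R)
        | none => 0)).sum := by
  induction proc with
  | nil => rfl
  | cons pc proc ih =>
    rw [List.filterMap_cons]
    cases h : pvClipB pc.2 b with
    | none => simpa [pvW, h] using ih
    | some ib =>
      simp only [h, Option.map_some, List.map_cons, List.sum_cons]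
      rw [← ih]
      unfold pvW
      simp [pv_sgn_notI]
      try ring

theorem pv_excl_cons (box b : PvBox) (R : List PvBox) :
    pvExcl box (b :: R) =
      pvExcl box R + (match pvClipB box b with
        | some ib => -(pvExcl ib R)
        | none => 0) := by
  cases h : pvClipB box b with
  | none => simp [pvExcl, h]
  | some ib => simp [pvExcl, h]; ring

theorem pvW_combine (b : PvBox) (R : List PvBox) (proc : List (Int × PvBox)) :
    pvW proc (b :: R) =
      pvW proc R +
      (proc.map (fun pc =>
        match pvClipB pc.2 b with
        | some ib => -(pvSgn pc.1 * pvExcl ib R)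
        | none => 0)).sum := by
  induction proc with
  | nil => rfl
  | cons pc proc ih =>
    unfold pvW at *
    simp only [List.map_cons, List.sum_cons]
    rw [ih, pv_excl_cons]
    cases h : pvClipB pc.2 b with
    | none => simp; ring
    | some ib => simp; ring

theorem pv_excl_nil_eq_vol (b : PvBox) : pvExcl b [] = pvVolA b := by
  obtain ⟨x1, x2, x3, x4, x5, x6⟩ := b; rfl

-- the key invariant: folding A's core step over kept, starting from proc
theorem pv_key (kept : List (Int × PvBox)) :
    ∀ proc, ((kept.foldl pvStepCore proc).map (fun c => pvVolA c.2 * pvSgn c.1)).sum =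
      pvW proc (kept.map Prod.snd) + pvTotalB kept := by
  induction kept with
  | nil =>
    intro proc
    simp only [List.foldl_nil, pvTotalB, List.map_nil, add_zero, pvW]
    congr 1
    apply List.map_congr_left
    intro e _
    rw [pv_excl_nil_eq_vol]; ring
  | cons c kept ih =>
    intro proc
    obtain ⟨on, b⟩ := c
    simp only [List.foldl_cons, ih]
    have hstep : pvStepCore proc (on, b) =
        (proc ++ proc.filterMap (fun pc => (pvClipB pc.2 b).map (fun ol => (pvNotI pc.1, ol)))) ++
          (if on ≠ 0 then [(on, b)] else []) := by
      unfold pvStepCore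
      by_cases h : on ≠ 0 <;> simp [h]
    rw [hstep, pvW_append, pvW_append, pvW_flips]
    have hR : ((on, b) :: kept).map Prod.snd = b :: kept.map Prod.snd := rfl
    simp only [hR]
    rw [pvW_combine]
    have hT : pvTotalB ((on, b) :: kept) =
        (if on ≠ 0 then pvTotalB kept + pvExcl b (kept.map Prod.snd) else pvTotalB kept) := rfl
    rw [hT]
    by_cases h : on ≠ 0
    · have hs : pvSgn on = 1 := by unfold pvSgn; rw [if_neg h]
      simp only [if_pos h, pvW, List.map_cons, List.map_nil, List.sum_cons, List.sum_nil, hs]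
      ring
    · simp only [if_neg h, pvW, List.map_nil, List.sum_nil]
      ring

-- ===== VERDICT (by name: the statement is the Claim_ definition above) =====
theorem calculate_spec : Claim_equal_calculate := by
  intro cubes limit _
  unfold Spec_calculate calculate calculate_alt
  rw [pv_fold_eq]
  rw [pv_key]
  simp [pvW]
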